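-- pv_equiv track=rewrite | github.com/scatterem/scatterem | scatterem2/utils/data/unittensor.py | _dim_units_to_string
-- ===== SOURCE A (Python) =====
-- from typing import Any, List, Optional, Sequence, Tuple, Union
--
-- def _dim_units_to_string(units: Tuple[str, ...]) -> str:
--     """Convert a single dimension's units tuple to string representation."""
--     if not units:
--         return "dimensionless"
--
--     # Group units by type and count, handling division
--     numerator_units: dict[str, int] = {}
--     denominator_units: dict[str, int] = {}
--     current_group = numerator_units
--
--     for unit in units:
--         if unit == "/":
--             current_group = denominator_units
--         elif unit == "*":
--             continue
--         else:
--             current_group[unit] = current_group.get(unit, 0) + 1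
--
--     # Build string representation
--     parts = []
--
--     # Numerator
--     if numerator_units:
--         num_parts = []
--         for unit, count in numerator_units.items():
--             if count == 1:
--                 num_parts.append(unit)
--             else:
--                 num_parts.append(f"{unit}^{count}")
--         parts.append("*".join(num_parts))
--
--     # Denominator
--     if denominator_units:
--         if parts:  # If we have a numerator, add division
--             parts.append("/")
--         denom_parts = []
--         for unit, count in denominator_units.items():
--             if count == 1:
--                 denom_parts.append(unit)
--             else:
--                 denom_parts.append(f"{unit}^{count}")
--         parts.append("*".join(denom_parts))
--
--     return "".join(parts) if parts else "dimensionless"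
-- ===== SOURCE B (Python) =====
-- def _counts(tokens):
--     """Ordered counts of tokens, skipping '*' and '/'."""
--     counts = {}
--     for t in tokens:
--         if t != "*" and t != "/":
--             counts[t] = counts.get(t, 0) + 1
--     return counts
--
--
-- def _fmt(counts):
--     """'*'-joined rendering of a count dict ('u' or 'u^c')."""
--     return "*".join(u if c == 1 else f"{u}^{c}" for u, c in counts.items())
--
--
-- def _dim_units_to_string(units):
--     """Convert a single dimension's units tuple to string representation."""
--     try:
--         i = list(units).index("/")
--     except ValueError:
--         i = len(units)
--     num = _counts(units[:i])
--     den = _counts(units[i:])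
--     if not num and not den:
--         return "dimensionless"
--     if not den:
--         return _fmt(num)
--     if not num:
--         return _fmt(den)
--     return _fmt(num) + "/" + _fmt(den)
-- ===== Notes on version B (the rewrite author's own statement) =====
-- stated objective: simpler
-- what changed: Replaces A's single stateful loop with a current-group toggle and duplicated numerator/denominator formatting code by splitting the list at the first '/', counting each slice with one shared helper, and formatting both groups with one shared join helper.
import Mathlib
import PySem

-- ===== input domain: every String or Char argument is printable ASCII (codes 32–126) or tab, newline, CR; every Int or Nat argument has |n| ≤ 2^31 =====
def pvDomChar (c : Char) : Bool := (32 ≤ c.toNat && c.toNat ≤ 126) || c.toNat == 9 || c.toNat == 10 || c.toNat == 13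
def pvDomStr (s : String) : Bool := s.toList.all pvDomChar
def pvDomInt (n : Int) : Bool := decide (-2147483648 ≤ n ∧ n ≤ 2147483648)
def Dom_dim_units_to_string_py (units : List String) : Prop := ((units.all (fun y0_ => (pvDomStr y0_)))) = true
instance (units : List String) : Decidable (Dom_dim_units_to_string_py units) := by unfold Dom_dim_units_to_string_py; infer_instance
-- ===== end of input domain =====

-- B replaces A's stateful numerator/denominator toggle by splitting at the first '/' and counting each slice; objective: simpler decomposition, same cost.

-- ===== PORT A =====
-- the for-loop over units with the current_group toggle (inDen : Bool picks the group)
def dimLoopA : List String → PySem.Dict String Int → PySem.Dict String Int → Bool →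
    PySem.Dict String Int × PySem.Dict String Int
  | [], num, den, _ => (num, den)
  | u :: rest, num, den, inDen =>
    if u = "/" then dimLoopA rest num den true
    else if u = "*" then dimLoopA rest num den inDen
    else if inDen then dimLoopA rest num (den.insert u (den.getD u 0 + 1)) true
    else dimLoopA rest (num.insert u (num.getD u 0 + 1)) den false

-- the num_parts/denom_parts building loop followed by "*".join
def dimFmtA (d : PySem.Dict String Int) : String :=
  PySem.Str.join "*" (d.items.foldl
    (fun acc p => acc ++ [if p.2 = 1 then p.1 else PySem.Str.join "" [p.1, "^", PySem.Int.toStr p.2]]) [])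

def dim_units_to_string_py (units : List String) : String :=
  if units = [] then "dimensionless"
  else
    let r := dimLoopA units .empty .empty false
    let parts : List String := if r.1.items ≠ [] then [dimFmtA r.1] else []
    let parts : List String :=
      if r.2.items ≠ [] then (if parts ≠ [] then parts ++ ["/"] else parts) ++ [dimFmtA r.2]
      else parts
    if parts ≠ [] then PySem.Str.join "" parts else "dimensionless"

-- ===== PORT B =====
-- _counts: ordered count dict of a token slice, skipping '*' and '/'
def dimCountsB (tokens : List String) : PySem.Dict String Int :=
  tokens.foldl (fun d t => if t ≠ "*" ∧ t ≠ "/" then d.insert t (d.getD t 0 + 1) else d) .empty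

-- _fmt: "*".join over the items
def dimFmtB (d : PySem.Dict String Int) : String :=
  PySem.Str.join "*"
    (d.items.map (fun p => if p.2 = 1 then p.1 else PySem.Str.join "" [p.1, "^", PySem.Int.toStr p.2]))

def dim_units_to_string_py_alt (units : List String) : String :=
  let i : Nat := (PySem.List.index? units "/").getD units.length
  let num := dimCountsB (PySem.List.slice units none (some (i : Int)))
  let den := dimCountsB (PySem.List.slice units (some (i : Int)) none)
  if num.items = [] ∧ den.items = [] then "dimensionless"
  else if den.items = [] then dimFmtB num
  else if num.items = [] then dimFmtB den
  else PySem.Str.join "" [dimFmtB num, "/", dimFmtB den]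

-- ===== PRECONDITION & SPEC =====
def Spec_dim_units_to_string_py (units : List String) (out : String) : Prop := out = dim_units_to_string_py_alt units
instance (units : List String) (out : String) : Decidable (Spec_dim_units_to_string_py units out) := by unfold Spec_dim_units_to_string_py; infer_instance

-- ===== CLAIM (what is proved, stated in full; the proofs are below) =====
def Claim_equal_dim_units_to_string_py : Prop := ∀ (units : List String), Dom_dim_units_to_string_py units → Spec_dim_units_to_string_py units (dim_units_to_string_py units)

-- ===== LEMMAS AND PROOFS =====

theorem dimLoopA_true (xs : List String) (num den : PySem.Dict String Int) :
    dimLoopA xs num den true =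
      (num, xs.foldl (fun d t => if t ≠ "*" ∧ t ≠ "/" then d.insert t (d.getD t 0 + 1) else d) den) := by
  induction xs generalizing den with
  | nil => rfl
  | cons u rest ih =>
    simp only [dimLoopA, List.foldl]
    by_cases h1 : u = "/"
    · simp [h1, ih]
    · by_cases h2 : u = "*" <;> simp [h1, h2, ih]

theorem dimLoopA_false (xs : List String) (num den : PySem.Dict String Int) :
    dimLoopA xs num den false =
      ((xs.take (xs.idxOf "/")).foldl (fun d t => if t ≠ "*" ∧ t ≠ "/" then d.insert t (d.getD t 0 + 1) else d) num,
       (xs.drop (xs.idxOf "/")).foldl (fun d t => if t ≠ "*" ∧ t ≠ "/" then d.insert t (d.getD t 0 + 1) else d) den) := by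
  induction xs generalizing num with
  | nil => rfl
  | cons u rest ih =>
    by_cases h1 : u = "/"
    · simp only [dimLoopA, h1, if_pos rfl, List.idxOf_cons_self, List.take_zero, List.drop_zero,
        List.foldl_nil, List.foldl_cons, dimLoopA_true]
      simp
    · have hidx : (u :: rest).idxOf "/" = rest.idxOf "/" + 1 := by
        simp [List.idxOf_cons, h1]
      by_cases h2 : u = "*"
      · simp only [dimLoopA, h1, h2, if_neg, if_pos rfl, ih, hidx, List.take_succ_cons,
          List.drop_succ_cons, List.foldl_cons]
        simp [h2]
      · simp only [dimLoopA, ih, hidx, List.take_succ_cons, List.drop_succ_cons, List.foldl_cons]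
        simp [h1, h2]

theorem foldl_append_map {α β : Type} (f : α → β) (xs : List α) (acc : List β) :
    xs.foldl (fun acc p => acc ++ [f p]) acc = acc ++ xs.map f := by
  induction xs generalizing acc with
  | nil => simp
  | cons x xs ih => simp [List.foldl_cons, ih]

theorem dimFmt_eq (d : PySem.Dict String Int) : dimFmtA d = dimFmtB d := by
  simp only [dimFmtA, dimFmtB, foldl_append_map, List.nil_append]

theorem join_empty_singleton (s : String) : PySem.Str.join "" [s] = s := by
  simp [PySem.Str.join, PySem.Chars.join, List.intercalate]

-- ===== VERDICT (by name: the statement is the Claim_ definition above) =====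
theorem getD_idxOf? {α : Type} [BEq α] [LawfulBEq α] (xs : List α) (v : α) :
    (xs.idxOf? v).getD xs.length = xs.idxOf v := by
  induction xs with
  | nil => rfl
  | cons u rest ih =>
    by_cases h : u = v
    · simp [h, List.idxOf?_cons, List.idxOf_cons]
    · have h2 := ih
      cases hr : rest.idxOf? v with
      | none =>
        simp only [hr, Option.getD_none] at h2
        simp [List.idxOf?_cons, List.idxOf_cons, cond_eq_if, h, hr, h2]
      | some k =>
        simp only [hr, Option.getD_some] at h2
        simp [List.idxOf?_cons, List.idxOf_cons, cond_eq_if, h, hr, h2]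

theorem dim_units_to_string_py_spec : Claim_equal_dim_units_to_string_py := by
  intro units _
  unfold Spec_dim_units_to_string_py
  simp only [dim_units_to_string_py, dim_units_to_string_py_alt]
  rw [PySem.List.index?_eq_idxOf?, getD_idxOf?,
    PySem.List.slice_to_natCast, PySem.List.slice_from_natCast,
    dimLoopA_false]
  simp only [dimCountsB]
  by_cases hnil : units = []
  · subst hnil; decide
  · simp only [hnil, if_false, dimFmt_eq]
    set N : PySem.Dict String Int := ((units.take (units.idxOf "/")).foldl
      (fun d t => if t ≠ "*" ∧ t ≠ "/" then d.insert t (d.getD t 0 + 1) else d) PySem.Dict.empty) with hN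
    set D : PySem.Dict String Int := ((units.drop (units.idxOf "/")).foldl
      (fun d t => if t ≠ "*" ∧ t ≠ "/" then d.insert t (d.getD t 0 + 1) else d) PySem.Dict.empty) with hD
    by_cases hn : N.items = [] <;> by_cases hd : D.items = [] <;>
      simp [hn, hd, join_empty_singleton]
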